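-- pv_equiv track=rewrite | github.com/furlanut/lottery-lab | backend/vincicasa/phase4_singles.py | _decade_strategy
-- ===== SOURCE A (Python) =====
-- def _decade_strategy(freq, last):
--     result = []
--     for d in range(4):
--         dec_nums = [n for n in range(d*10+1, d*10+11)]
--         dec_nums.sort(key=lambda n: -freq.get(n, 0))
--         if dec_nums:
--             result.append(dec_nums[0])
--     # 5° da decina con piu' frequenza
--     all_remaining = [n for n in range(1,41) if n not in result]
--     all_remaining.sort(key=lambda n: -freq.get(n, 0))
--     if all_remaining:
--         result.append(all_remaining[0])
--     return result[:5]
-- ===== SOURCE B (Python) =====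
-- def _decade_strategy(freq, last):
--     result = [max(range(d * 10 + 1, d * 10 + 11), key=lambda n: freq.get(n, 0))
--               for d in range(4)]
--     pool = [n for n in range(1, 41) if n not in result]
--     result.append(max(pool, key=lambda n: freq.get(n, 0)))
--     return result
-- ===== Notes on version B (the rewrite author's own statement) =====
-- stated objective: idiomatic
-- what changed: Replaces the two full descending sorts (and head-taking with emptiness guards) by direct first-max scans with max(..., key=...); the fixed ranges make all guards and the final [:5] unnecessary, so B is a comprehension plus one max over the remaining pool.
import Mathlib
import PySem

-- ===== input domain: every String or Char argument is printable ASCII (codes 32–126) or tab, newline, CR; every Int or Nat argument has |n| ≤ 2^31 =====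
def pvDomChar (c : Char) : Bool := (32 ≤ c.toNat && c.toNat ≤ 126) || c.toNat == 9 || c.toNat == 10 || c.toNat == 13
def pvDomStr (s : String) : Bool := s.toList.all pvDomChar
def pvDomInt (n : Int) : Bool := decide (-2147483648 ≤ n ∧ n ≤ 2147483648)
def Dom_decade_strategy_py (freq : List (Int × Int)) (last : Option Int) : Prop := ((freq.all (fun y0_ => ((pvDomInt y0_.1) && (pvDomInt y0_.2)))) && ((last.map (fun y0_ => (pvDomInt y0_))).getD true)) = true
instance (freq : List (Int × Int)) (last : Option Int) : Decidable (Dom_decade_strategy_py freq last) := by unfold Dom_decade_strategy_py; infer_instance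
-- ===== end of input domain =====

-- B replaces A's two descending sorts + emptiness guards + [:5] by direct first-max scans
-- (max with key); equivalence of the return value is proved for every input.

-- ===== PORT A =====
def decade_strategy_py (freq : List (Int × Int)) (last : Option Int) : List Int :=
  let result := (PySem.List.pyRange 0 4).foldl (fun result d =>
    let dec_nums := PySem.List.pyRange (d * 10 + 1) (d * 10 + 11)
    let dec_nums := PySem.List.sorted dec_nums (fun n => -(PySem.Dict.getD (PySem.Dict.mk freq) n 0)) false
    match dec_nums with
    | [] => result
    | m :: _ => result ++ [m]) []
  let all_remaining := (PySem.List.pyRange 1 41).filter (fun n => !(result.contains n))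
  let all_remaining := PySem.List.sorted all_remaining (fun n => -(PySem.Dict.getD (PySem.Dict.mk freq) n 0)) false
  let result := match all_remaining with
    | [] => result
    | m :: _ => result ++ [m]
  PySem.List.slice result none (some 5)

-- ===== PORT B =====
def decade_strategy_py_alt (freq : List (Int × Int)) (last : Option Int) : List Int :=
  let result := (PySem.List.pyRange 0 4).map (fun d =>
    (PySem.List.max? (PySem.List.pyRange (d * 10 + 1) (d * 10 + 11))
      (fun n => PySem.Dict.getD (PySem.Dict.mk freq) n 0)).getD 0)
  let pool := (PySem.List.pyRange 1 41).filter (fun n => !(result.contains n))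
  result ++ [(PySem.List.max? pool (fun n => PySem.Dict.getD (PySem.Dict.mk freq) n 0)).getD 0]

-- ===== PRECONDITION & SPEC =====
def Spec_decade_strategy_py (freq : List (Int × Int)) (last : Option Int) (out : List Int) : Prop := out = decade_strategy_py_alt freq last
instance (freq : List (Int × Int)) (last : Option Int) (out : List Int) : Decidable (Spec_decade_strategy_py freq last out) := by unfold Spec_decade_strategy_py; infer_instance

-- ===== CLAIM (what is proved, stated in full; the proofs are below) =====
def Claim_equal_decade_strategy_py : Prop := ∀ (freq : List (Int × Int)) (last : Option Int), Dom_decade_strategy_py freq last → Spec_decade_strategy_py freq last (decade_strategy_py freq last)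

-- ===== LEMMAS AND PROOFS =====

-- head of insertBy, computed from the head of the target list only
lemma head?_insertBy {α : Type} (before : α → α → Bool) (x : α) (ys : List α) :
    (PySem.List.insertBy before x ys).head? =
      some (match ys with | [] => x | y :: _ => if before x y then x else y) := by
  cases ys with
  | nil => simp [PySem.List.insertBy]
  | cons y t => by_cases h : before x y = true <;> simp [PySem.List.insertBy, h]

-- the head of A's stable insertion sort by negated key evolves by exactly B's first-max fold step
lemma head?_sort_fold (k : Int → Int) (xs : List Int) : ∀ acc : List Int,
    (xs.foldl (fun acc x =>
        PySem.List.insertBy (fun a b => decide (-(k a) < -(k b))) x acc) acc).head? =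
      xs.foldl (fun m x =>
        match m with
        | none => some x
        | some m => if k m < k x then some x else some m) acc.head? := by
  induction xs with
  | nil => intro acc; simp
  | cons x t ih =>
    intro acc
    rw [List.foldl_cons, List.foldl_cons, ih, head?_insertBy]
    cases acc with
    | nil => rfl
    | cons y ys =>
      simp only [List.head?_cons]
      by_cases h : k y < k x
      · have hd : (decide (-(k x) < -(k y))) = true := by simp; omega
        rw [hd]; simp [h]
      · have hd : (decide (-(k x) < -(k y))) = false := by simp; omega
        rw [hd]; simp [h]

-- head of the descending (negated-key) sort = Python's max(..., key), the first maximum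
lemma head?_sorted_neg_eq_max? (k : Int → Int) (xs : List Int) :
    (PySem.List.sorted xs (fun n => -(k n)) false).head? = PySem.List.max? xs k := by
  rw [PySem.List.sorted_eq_foldl_insertBy, head?_sort_fold k xs []]
  simp only [List.head?_nil, PySem.List.max?]
  congr 1
  funext m x
  cases m <;> rfl

-- packaging: for nonempty xs, max? is some m and the sort starts with that same m
lemma sorted_cons_of_ne_nil (k negk : Int → Int) (hneg : negk = fun n => -(k n))
    (xs : List Int) (hne : xs ≠ []) :
    ∃ m t, PySem.List.max? xs k = some m ∧
      PySem.List.sorted xs negk false = m :: t := by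
  subst hneg
  obtain ⟨m, hm⟩ : ∃ m, PySem.List.max? xs k = some m := by
    cases h : PySem.List.max? xs k with
    | none => exact absurd ((PySem.List.max?_eq_none_iff xs k).mp h) hne
    | some m => exact ⟨m, rfl⟩
  have hh := head?_sorted_neg_eq_max? k xs
  rw [hm] at hh
  cases hs : PySem.List.sorted xs (fun n => -(k n)) false with
  | nil => rw [hs] at hh; simp at hh
  | cons a t =>
    rw [hs] at hh; simp at hh
    refine ⟨a, t, ?_, rfl⟩
    rw [hh]; exact hm

lemma pyRange_decade_ne_nil (a : Int) : PySem.List.pyRange a (a + 10) ≠ [] :=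
  List.ne_nil_of_mem (PySem.List.mem_pyRange_one.mpr ⟨le_refl a, by omega⟩)

theorem decade_strategy_py_spec : Claim_equal_decade_strategy_py := by
  intro freq last _
  unfold Spec_decade_strategy_py decade_strategy_py decade_strategy_py_alt
  have hC := sorted_cons_of_ne_nil (fun n => PySem.Dict.getD (PySem.Dict.mk freq) n 0)
    (fun n => -(PySem.Dict.getD (PySem.Dict.mk freq) n 0)) rfl
  obtain ⟨m0, t0, hm0, hs0⟩ := hC (PySem.List.pyRange (0 * 10 + 1) (0 * 10 + 11)) (by norm_num; exact pyRange_decade_ne_nil 1)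
  obtain ⟨m1, t1, hm1, hs1⟩ := hC (PySem.List.pyRange (1 * 10 + 1) (1 * 10 + 11)) (by norm_num; exact pyRange_decade_ne_nil 11)
  obtain ⟨m2, t2, hm2, hs2⟩ := hC (PySem.List.pyRange (2 * 10 + 1) (2 * 10 + 11)) (by norm_num; exact pyRange_decade_ne_nil 21)
  obtain ⟨m3, t3, hm3, hs3⟩ := hC (PySem.List.pyRange (3 * 10 + 1) (3 * 10 + 11)) (by norm_num; exact pyRange_decade_ne_nil 31)
  have hrange : PySem.List.pyRange 0 4 = [0, 1, 2, 3] := by decide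
  simp only [hrange, List.foldl_cons, List.foldl_nil, List.map_cons, List.map_nil,
    hs0, hs1, hs2, hs3, hm0, hm1, hm2, hm3, Option.getD_some, List.nil_append,
    List.cons_append]
  have hb1 := PySem.List.mem_pyRange_one.mp (PySem.List.max?_mem hm1)
  have hb2 := PySem.List.mem_pyRange_one.mp (PySem.List.max?_mem hm2)
  have hb3 := PySem.List.mem_pyRange_one.mp (PySem.List.max?_mem hm3)
  have hpool : List.filter (fun n => ! [m0, m1, m2, m3].contains n) (PySem.List.pyRange 1 41) ≠ [] := by
    intro h
    have hall := List.filter_eq_nil_iff.mp h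
    have c1 := hall 1 (PySem.List.mem_pyRange_one.mpr (by omega))
    have c2 := hall 2 (PySem.List.mem_pyRange_one.mpr (by omega))
    simp at c1 c2
    omega
  obtain ⟨m4, t4, hm4, hs4⟩ := hC _ hpool
  rw [hs4, hm4]
  rw [PySem.List.slice_to _ (by norm_num)]
  rfl
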